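-- pv_equiv track=rewrite | github.com/mrbartrns/algorithm-and-structure | programmers/monthly_challenge/bit.py | solution
-- ===== SOURCE A (Python) =====
-- def solution(numbers):
--     answer = []
--     for number in numbers:
--         if not (number & 1):
--             answer.append(number + 1)
--         else:
--             idx = 1
--             while True:
--                 if not (number & (1 << idx)):
--                     number |= 1 << idx
--                     number ^= 1 << (idx - 1)
--                     answer.append(number)
--                     break
--                 idx += 1
--     return answer
-- ===== SOURCE B (Python) =====
-- def solution(numbers):
--     # closed-form: for odd n, ((n ^ (n+1)) + 1) >> 2 is 2**(k-1) where k = lowest unset bit of n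
--     return [n + 1 if n % 2 == 0 else n + (((n ^ (n + 1)) + 1) >> 2) for n in numbers]
-- ===== Notes on version B (the rewrite author's own statement) =====
-- stated objective: alternative
-- what changed: A scans bit positions in a while-loop to find the lowest unset bit of each odd number; B replaces the scan by the closed-form bit expression n + (((n ^ (n+1)) + 1) >> 2), so the odd branch is a single arithmetic expression with no loop.
-- outside the precondition, e.g. on solution([-1]): A does not finish within the time limit, B returns [-1]
import Mathlib
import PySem

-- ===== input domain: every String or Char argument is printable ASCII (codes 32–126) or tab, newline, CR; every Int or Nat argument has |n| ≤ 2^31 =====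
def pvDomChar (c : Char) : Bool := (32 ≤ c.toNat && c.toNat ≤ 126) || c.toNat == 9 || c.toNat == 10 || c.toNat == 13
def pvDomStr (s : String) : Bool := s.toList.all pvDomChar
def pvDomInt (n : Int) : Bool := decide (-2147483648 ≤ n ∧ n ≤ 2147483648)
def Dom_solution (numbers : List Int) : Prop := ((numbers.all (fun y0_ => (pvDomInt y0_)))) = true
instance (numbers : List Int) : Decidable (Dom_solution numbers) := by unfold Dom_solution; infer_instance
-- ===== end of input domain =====

-- B replaces A's per-element while-scan for the lowest unset bit by the closed-form
-- bit expression n + (((n ^ (n+1)) + 1) >> 2)  (objective: alternative / simpler odd branch).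

-- ===== PORT A =====
-- the while-True loop of A; fuel 64 suffices for every |n| ≤ 2^31 with n ≠ -1 (the loop
-- stops at the lowest unset bit, which is at index ≤ 31 there); on -1 Python A diverges
-- and -1 is excluded by Pre_solution.
def solLoopA (number : Int) : Nat → Nat → Int
  | _, 0 => number
  | idx, fuel+1 =>
    if PySem.Int.band number ((1:Int) <<< idx) = 0 then
      PySem.Int.bxor (PySem.Int.bor number ((1:Int) <<< idx)) ((1:Int) <<< (idx - 1))
    else solLoopA number (idx+1) fuel

def solution (numbers : List Int) : List Int :=
  numbers.foldl (fun answer number =>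
    if PySem.Int.band number 1 = 0 then answer ++ [number + 1]
    else answer ++ [solLoopA number 1 64]) []

-- ===== PORT B =====
def solution_alt (numbers : List Int) : List Int :=
  numbers.map (fun n =>
    if PySem.Int.mod n 2 = 0 then n + 1
    else n + ((PySem.Int.bxor n (n + 1) + 1) >>> (2:Nat)))

-- ===== PRECONDITION & SPEC =====
-- Pre_ excludes lists containing -1: there A's while-loop never finds an unset bit and
-- Python A diverges (no value is returned); B returns -1 for that element.
def Pre_solution (numbers : List Int) : Prop := (-1 : Int) ∉ numbers
instance (numbers : List Int) : Decidable (Pre_solution numbers) := by unfold Pre_solution; infer_instance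
def pvWitness_solution : List Int := [0, 5, -4, 2147483647, -7]

def Spec_solution (numbers : List Int) (out : List Int) : Prop := out = solution_alt numbers
instance (numbers : List Int) (out : List Int) : Decidable (Spec_solution numbers out) := by unfold Spec_solution; infer_instance

-- ===== CLAIM (what is proved, stated in full; the proofs are below) =====
def Claim_equal_solution : Prop := ∀ (numbers : List Int), Dom_solution numbers → Pre_solution numbers → Spec_solution numbers (solution numbers)

-- ===== LEMMAS AND PROOFS =====

theorem pvOrHigh (K A : Nat) :
    (2^(K+1)*A + (2^K-1)) ||| 2^K = 2^(K+1)*A + (2^(K+1)-1) := by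
  have hb1 : 2^K-1 < 2^(K+1) := by
    have := Nat.one_le_two_pow (n := K); have := Nat.pow_lt_pow_succ (a := 2) (n := K) one_lt_two; omega
  have hb2 : 2^(K+1)-1 < 2^(K+1) := by have := Nat.one_le_two_pow (n := K+1); omega
  apply Nat.eq_of_testBit_eq
  intro j
  rw [Nat.testBit_lor, Nat.testBit_two_pow_mul_add A hb1 j, Nat.testBit_two_pow_mul_add A hb2 j,
      Nat.testBit_two_pow]
  by_cases hj : j < K + 1
  · simp only [hj, if_pos, Nat.testBit_two_pow_sub_one]
    by_cases hjk : j < K <;> simp [hjk] <;> omega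
  · simp only [hj, if_neg, if_false]
    have : ¬ (K = j) := by omega
    simp [this]

theorem pvXorMask (K A : Nat) (hK : 1 ≤ K) :
    (2^(K+1)*A + (2^(K+1)-1)) ^^^ 2^(K-1) = 2^(K+1)*A + (2^K + 2^(K-1) - 1) := by
  have hKK : 2^(K-1) ≤ 2^K := Nat.pow_le_pow_right (by norm_num) (by omega)
  have hK1 : 2^K < 2^(K+1) := Nat.pow_lt_pow_succ one_lt_two
  have h1 : (1:Nat) ≤ 2^(K-1) := Nat.one_le_two_pow
  have hb1 : 2^(K+1)-1 < 2^(K+1) := by omega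
  have hb2 : 2^K + 2^(K-1) - 1 < 2^(K+1) := by
    have : 2^(K+1) = 2*2^K := by rw [Nat.pow_succ]; ring
    omega
  -- low part as 2^(K-1)*? : express 2^K + 2^(K-1) - 1 bits directly
  apply Nat.eq_of_testBit_eq
  intro j
  rw [Nat.testBit_xor, Nat.testBit_two_pow_mul_add A hb1 j, Nat.testBit_two_pow_mul_add A hb2 j,
      Nat.testBit_two_pow]
  -- bits of 2^K + 2^(K-1) - 1 = 2^(K-1)*2 + (2^(K-1)-1)
  have hrw : 2^K + 2^(K-1) - 1 = 2^(K-1)*2 + (2^(K-1)-1) := by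
    have h2K : 2^(K-1)*2 = 2^K := by rw [← Nat.pow_succ]; congr 1; omega
    omega
  by_cases hj : j < K + 1
  · simp only [hj, if_pos, Nat.testBit_two_pow_sub_one, hrw]
    rw [Nat.testBit_two_pow_mul_add 2 (by omega) j]
    by_cases hj2 : j < K - 1
    · simp [hj2, Nat.testBit_two_pow_sub_one]; omega
    · by_cases hj3 : j = K - 1
      · subst hj3; simp [hj2, Nat.testBit_two_pow_sub_one]
      · have hj4 : ¬ (K - 1 = j) := by omega
        simp only [hj2, if_neg, if_false, hj4, decide_false]
        have h2 : (2:Nat).testBit (j - (K-1)) = decide (j - (K-1) = 1) := by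
          have : (2:Nat) = 2^1 := rfl
          rw [this, Nat.testBit_two_pow]; simp [eq_comm]
        rw [h2]
        have : decide (j < K+1) = true := by simpa using hj
        simp only [Nat.testBit_two_pow_sub_one] at *
        by_cases hj5 : j - (K-1) = 1 <;> simp [hj5] <;> omega
  · have : ¬ (K - 1 = j) := by omega
    simp only [hj, if_neg, if_false, this, decide_false, hrw]
    simp

theorem pvXorDisj (K A : Nat) (hK : 1 ≤ K) :
    (2^(K+1)*A) ^^^ 2^(K-1) = 2^(K+1)*A + 2^(K-1) := by
  have hb1 : (0:Nat) < 2^(K+1) := Nat.two_pow_pos _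
  have hb2 : 2^(K-1) < 2^(K+1) := Nat.pow_lt_pow_right one_lt_two (by omega)
  apply Nat.eq_of_testBit_eq
  intro j
  rw [Nat.testBit_xor,
      show 2^(K+1)*A = 2^(K+1)*A + 0 by omega,
      Nat.testBit_two_pow_mul_add A hb1 j]
  rw [show 2^(K+1)*A + 0 + 2^(K-1) = 2^(K+1)*A + 2^(K-1) by omega,
      Nat.testBit_two_pow_mul_add A hb2 j, Nat.testBit_two_pow]
  by_cases hj : j < K + 1
  · simp [hj, Nat.testBit_two_pow]
  · have : ¬ (K - 1 = j) := by omega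
    simp [hj, this]

theorem pvXorAdj (K A : Nat) :
    (2^(K+1)*A + 2^K) ^^^ (2^(K+1)*A + (2^K-1)) = 2^(K+1)-1 := by
  have h1 : (1:Nat) ≤ 2^K := Nat.one_le_two_pow
  have hK1 : 2^K < 2^(K+1) := Nat.pow_lt_pow_succ one_lt_two
  apply Nat.eq_of_testBit_eq
  intro j
  rw [Nat.testBit_xor, Nat.testBit_two_pow_mul_add A hK1 j,
      Nat.testBit_two_pow_mul_add A (show 2^K-1 < 2^(K+1) by omega) j,
      Nat.testBit_two_pow_sub_one]
  by_cases hj : j < K + 1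
  · simp only [hj, if_pos, Nat.testBit_two_pow, Nat.testBit_two_pow_sub_one]
    by_cases hjk : j < K
    · have : ¬ (K = j) := by omega
      simp [this, hjk]
    · have hjK : j = K := by omega
      simp [hjK]
  · simp [hj]

-- cast helpers
theorem pvCastPos (k : Nat) (a : Int) (ha : 0 ≤ a) :
    a * 2^(k+1) + 2^k - 1 = ((2^(k+1)*a.toNat + (2^k-1) : Nat) : Int) := by
  have h1 : (1:Nat) ≤ 2^k := Nat.one_le_two_pow
  push_cast [Int.toNat_of_nonneg ha, h1]
  ring

theorem pvCastNeg (k : Nat) (a : Int) (ha : a ≤ -1) :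
    (-(a * 2^(k+1) + 2^k - 1) - 1).toNat = 2^(k+1)*(-a-1).toNat + 2^k := by
  have hA : ((-a-1).toNat : Int) = -a-1 := Int.toNat_of_nonneg (by omega)
  have h : -(a * 2^(k+1) + 2^k - 1) - 1 = ((2^(k+1)*(-a-1).toNat + 2^k : Nat) : Int) := by
    push_cast [hA]; ring
  rw [h, Int.toNat_natCast]

theorem pvNegOfNeg (k : Nat) (a : Int) (ha : a ≤ -1) : a * 2^(k+1) + 2^k - 1 < 0 := by
  have h1 : (1:Int) ≤ 2^k := one_le_pow₀ (by norm_num)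
  have hp : (2:Int)^(k+1) = 2*2^k := by rw [pow_succ]; ring
  nlinarith [mul_le_mul_of_nonneg_right (show a ≤ -1 by omega) (show (0:Int) ≤ 2^(k+1) by positivity)]

theorem pvBand_low (k : Nat) (a : Int) (i : Nat) (hi : i < k) :
    PySem.Int.band (a * 2^(k+1) + 2^k - 1) ((2:Int)^i) = 2^i := by
  rcases le_or_gt 0 a with ha | ha
  · rw [pvCastPos k a ha, show ((2:Int)^i) = ((2^i : Nat) : Int) by push_cast; ring,
       PySem.Int.band_natCast]
    have hb : 2^k-1 < 2^(k+1) := by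
      have := Nat.one_le_two_pow (n := k); have := Nat.pow_lt_pow_succ (a := 2) (n := k) one_lt_two; omega
    rw [Nat.and_two_pow, Nat.testBit_two_pow_mul_add a.toNat hb i, if_pos (by omega),
       Nat.testBit_two_pow_sub_one]
    simp [hi]
  · have ha' : a ≤ -1 := by omega
    have hneg := pvNegOfNeg k a ha'
    simp only [PySem.Int.band]
    rw [if_neg (by omega), if_pos (by positivity)]
    rw [pvCastNeg k a ha', show ((2:Int)^i).toNat = 2^i by rw [show ((2:Int)^i) = ((2^i : Nat) : Int) by push_cast; ring, Int.toNat_natCast]]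
    have hb : 2^k < 2^(k+1) := Nat.pow_lt_pow_succ one_lt_two
    rw [Nat.two_pow_and, Nat.testBit_two_pow_mul_add (-a-1).toNat hb i, if_pos (by omega),
       Nat.testBit_two_pow]
    simp only [show ¬ (k = i) by omega, decide_false, Bool.toNat_false, Nat.mul_zero, Nat.sub_zero]
    push_cast; ring

theorem pvBand_high (k : Nat) (a : Int) :
    PySem.Int.band (a * 2^(k+1) + 2^k - 1) ((2:Int)^k) = 0 := by
  rcases le_or_gt 0 a with ha | ha
  · rw [pvCastPos k a ha, show ((2:Int)^k) = ((2^k : Nat) : Int) by push_cast; ring,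
       PySem.Int.band_natCast]
    have hb : 2^k-1 < 2^(k+1) := by
      have := Nat.one_le_two_pow (n := k); have := Nat.pow_lt_pow_succ (a := 2) (n := k) one_lt_two; omega
    rw [Nat.and_two_pow, Nat.testBit_two_pow_mul_add a.toNat hb k, if_pos (by omega),
       Nat.testBit_two_pow_sub_one]
    simp
  · have ha' : a ≤ -1 := by omega
    have hneg := pvNegOfNeg k a ha'
    simp only [PySem.Int.band]
    rw [if_neg (by omega), if_pos (by positivity)]
    rw [pvCastNeg k a ha', show ((2:Int)^k).toNat = 2^k by rw [show ((2:Int)^k) = ((2^k : Nat) : Int) by push_cast; ring, Int.toNat_natCast]]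
    have hb : 2^k < 2^(k+1) := Nat.pow_lt_pow_succ one_lt_two
    rw [Nat.two_pow_and, Nat.testBit_two_pow_mul_add (-a-1).toNat hb k, if_pos (by omega),
       Nat.testBit_two_pow]
    simp

theorem pvBor_eq (k : Nat) (a : Int) :
    PySem.Int.bor (a * 2^(k+1) + 2^k - 1) ((2:Int)^k) = a * 2^(k+1) + 2^k - 1 + 2^k := by
  have hp : (2:Int)^(k+1) = 2^k*2 := pow_succ 2 k
  have h1 : (1:Nat) ≤ 2^(k+1) := Nat.one_le_two_pow
  rcases le_or_gt 0 a with ha | ha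
  · rw [pvCastPos k a ha, show ((2:Int)^k) = ((2^k : Nat) : Int) by push_cast; ring,
       PySem.Int.bor_natCast, pvOrHigh k a.toNat]
    have h1k : (1:Nat) ≤ 2^k := Nat.one_le_two_pow
    push_cast [Int.toNat_of_nonneg ha, h1, h1k]
    rw [hp]; ring
  · have ha' : a ≤ -1 := by omega
    have hneg := pvNegOfNeg k a ha'
    simp only [PySem.Int.bor]
    rw [if_neg (by omega), if_pos (by positivity)]
    rw [pvCastNeg k a ha', show ((2:Int)^k).toNat = 2^k by
      rw [show ((2:Int)^k) = ((2^k : Nat) : Int) by push_cast; ring, Int.toNat_natCast]]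
    have hb : 2^k < 2^(k+1) := Nat.pow_lt_pow_succ one_lt_two
    rw [Nat.and_two_pow, Nat.testBit_two_pow_mul_add (-a-1).toNat hb k, if_pos (by omega),
       Nat.testBit_two_pow]
    simp only [decide_true, Bool.toNat_true, Nat.one_mul, Nat.add_sub_cancel]
    have hA : ((-a-1).toNat : Int) = -a-1 := Int.toNat_of_nonneg (by omega)
    push_cast [hA]
    rw [hp]; ring

theorem pvBxor_clear (k : Nat) (a : Int) (hK : 1 ≤ k) :
    PySem.Int.bxor (a * 2^(k+1) + 2^k - 1 + 2^k) ((2:Int)^(k-1))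
      = a * 2^(k+1) + 2^k - 1 + 2^(k-1) := by
  have hp : (2:Int)^(k+1) = 2^k*2 := pow_succ 2 k
  have hp2 : (2:Int)^k = 2^(k-1)*2 := by
    conv_lhs => rw [show k = (k-1)+1 by omega]
    exact pow_succ 2 (k-1)
  have h1 : (1:Nat) ≤ 2^(k+1) := Nat.one_le_two_pow
  have h1k : (1:Nat) ≤ 2^k := Nat.one_le_two_pow
  rcases le_or_gt 0 a with ha | ha
  · have hx : a * 2^(k+1) + 2^k - 1 + 2^k = ((2^(k+1)*a.toNat + (2^(k+1)-1) : Nat) : Int) := by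
      push_cast [Int.toNat_of_nonneg ha, h1]
      rw [hp]; ring
    rw [hx, show ((2:Int)^(k-1)) = ((2^(k-1) : Nat) : Int) by push_cast; ring,
       PySem.Int.bxor_natCast, pvXorMask k a.toNat hK]
    rw [Nat.cast_add, Nat.cast_sub (le_trans h1k (Nat.le_add_right _ _))]
    push_cast [Int.toNat_of_nonneg ha]
    rw [hp, hp2]; ring
  · have ha' : a ≤ -1 := by omega
    have hA : ((-a-1).toNat : Int) = -a-1 := Int.toNat_of_nonneg (by omega)
    have hxneg : a * 2^(k+1) + 2^k - 1 + 2^k = -((2^(k+1)*(-a-1).toNat : Nat) : Int) - 1 := by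
      push_cast [hA]; rw [hp]; ring
    rw [hxneg]
    simp only [PySem.Int.bxor]
    rw [if_neg (by
      have : (0:Int) ≤ ((2^(k+1)*(-a-1).toNat : Nat) : Int) := by positivity
      omega), if_pos (by positivity)]
    rw [show (-(-((2^(k+1)*(-a-1).toNat : Nat) : Int) - 1) - 1) = ((2^(k+1)*(-a-1).toNat : Nat) : Int) by ring,
       Int.toNat_natCast,
       show ((2:Int)^(k-1)).toNat = 2^(k-1) by
         rw [show ((2:Int)^(k-1)) = ((2^(k-1) : Nat) : Int) by push_cast; ring, Int.toNat_natCast],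
       pvXorDisj k (-a-1).toNat hK]
    push_cast [hA]
    rw [hp, hp2]; ring

theorem pvBxor_succ (k : Nat) (a : Int) (hK : 1 ≤ k) :
    PySem.Int.bxor (a * 2^(k+1) + 2^k - 1) (a * 2^(k+1) + 2^k) = 2^(k+1) - 1 := by
  have hp : (2:Int)^(k+1) = 2^k*2 := pow_succ 2 k
  have h1 : (1:Nat) ≤ 2^(k+1) := Nat.one_le_two_pow
  have h1k : (1:Nat) ≤ 2^k := Nat.one_le_two_pow
  rcases le_or_gt 0 a with ha | ha
  · rw [pvCastPos k a ha,
       show a * 2^(k+1) + 2^k = ((2^(k+1)*a.toNat + 2^k : Nat) : Int) by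
         push_cast [Int.toNat_of_nonneg ha]; ring,
       PySem.Int.bxor_natCast, Nat.xor_comm, pvXorAdj k a.toNat]
    push_cast [h1]; ring
  · have ha' : a ≤ -1 := by omega
    have hA : ((-a-1).toNat : Int) = -a-1 := Int.toNat_of_nonneg (by omega)
    have hMpos : (1:Nat) ≤ 2^(k+1)*(-a-1).toNat + 2^k := by have := h1k; omega
    have hneg := pvNegOfNeg k a ha'
    have htneg : a * 2^(k+1) + 2^k < 0 := by
      have : a * 2^(k+1) + 2^k = -(((2^(k+1)*(-a-1).toNat + 2^k : Nat) : Int) - 1) - 1 := by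
        push_cast [hA]; ring
      rw [this]
      have : (1:Int) ≤ ((2^(k+1)*(-a-1).toNat + 2^k : Nat) : Int) := by exact_mod_cast hMpos
      omega
    simp only [PySem.Int.bxor]
    rw [if_neg (by omega), if_neg (by omega)]
    rw [show (-(a * 2^(k+1) + 2^k - 1) - 1) = ((2^(k+1)*(-a-1).toNat + 2^k : Nat) : Int) by
         push_cast [hA]; ring,
       show (-(a * 2^(k+1) + 2^k) - 1) = ((2^(k+1)*(-a-1).toNat + (2^k-1) : Nat) : Int) by
         push_cast [hA, h1k]; ring,
       Int.toNat_natCast, Int.toNat_natCast, pvXorAdj k (-a-1).toNat]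
    push_cast [h1]; ring

theorem pvShiftPow (idx : Nat) : (1:Int) <<< idx = 2^idx := by
  rw [Int.shiftLeft_eq]; ring

theorem pvLoop_eval (k : Nat) (a : Int) (hk : 1 ≤ k) :
    ∀ fuel idx, 1 ≤ idx → idx ≤ k → k + 1 ≤ idx + fuel →
    solLoopA (a * 2^(k+1) + 2^k - 1) idx fuel = a * 2^(k+1) + 2^k - 1 + 2^(k-1) := by
  intro fuel
  induction fuel with
  | zero => intro idx h1 h2 h3; omega
  | succ fuel ih =>
    intro idx h1 h2 h3
    show (if PySem.Int.band _ ((1:Int) <<< idx) = 0 then _ else solLoopA _ (idx+1) fuel) = _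
    rcases Nat.lt_or_ge idx k with hlt | hge
    · rw [if_neg (by
        rw [pvShiftPow, pvBand_low k a idx hlt]
        positivity)]
      exact ih (idx+1) (by omega) (by omega) (by omega)
    · have hik : idx = k := by omega
      subst hik
      rw [if_pos (by rw [pvShiftPow, pvBand_high])]
      rw [pvShiftPow, pvShiftPow, pvBor_eq, pvBxor_clear idx a (by omega)]

theorem pvDecomp (N : Nat) : ∀ n : Int, n.natAbs ≤ N → PySem.Int.mod n 2 = 1 → n ≠ -1 →
    ∃ (k : Nat) (a : Int), 1 ≤ k ∧ n = a * 2^(k+1) + 2^k - 1 := by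
  induction N with
  | zero =>
    intro n hN hmod _
    have : n = 0 := by omega
    subst this
    simp [show PySem.Int.mod 0 2 = 0 from by decide] at hmod
  | succ N ih =>
    intro n hN hmod hne
    rw [PySem.Int.mod_eq_emod_of_pos (by norm_num)] at hmod
    obtain ⟨m, hm⟩ : ∃ m, n = 2*m+1 := ⟨(n-1)/2, by omega⟩
    by_cases hme : m % 2 = 0
    · obtain ⟨b, hb⟩ : ∃ b, m = 2*b := ⟨m/2, by omega⟩
      exact ⟨1, b, le_refl 1, by subst hm hb; norm_num; ring⟩
    · have hmne : m ≠ -1 := by rintro rfl; exact hne (by omega)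
      have hmN : m.natAbs ≤ N := by
        have hm0 : m ≠ 0 := by omega
        omega
      obtain ⟨k, a, hk, ha⟩ := ih m hmN (by rw [PySem.Int.mod_eq_emod_of_pos (by norm_num)]; omega) hmne
      refine ⟨k+1, a, by omega, ?_⟩
      subst hm ha
      rw [show (2:Int)^(k+1+1) = 2^(k+1)*2 from pow_succ 2 (k+1),
          show (2:Int)^(k+1) = 2^k*2 from pow_succ 2 k]
      ring

theorem pvK_le (k : Nat) (a n : Int) (hk : 1 ≤ k) (hn : n = a * 2^(k+1) + 2^k - 1)
    (h1 : -2147483648 ≤ n) (h2 : n ≤ 2147483648) : k ≤ 31 := by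
  by_contra hgt
  have h32 : (2:Int)^32 ≤ 2^k := pow_le_pow_right₀ (by norm_num) (by omega)
  have hval : (2:Int)^32 = 4294967296 := by norm_num
  have hp : (2:Int)^(k+1) = 2^k*2 := pow_succ 2 k
  rcases le_or_gt 0 a with ha | ha
  · have : 0 ≤ a * 2^(k+1) := by positivity
    omega
  · have ha' : a ≤ -1 := by omega
    have : a * 2^(k+1) ≤ -2^(k+1) := by nlinarith [pow_pos (show (0:Int) < 2 by norm_num) (k+1)]
    omega

theorem pvElem (n : Int) (h1 : -2147483648 ≤ n) (h2 : n ≤ 2147483648) (hne : n ≠ -1) :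
    (if PySem.Int.band n 1 = 0 then n + 1 else solLoopA n 1 64)
      = (if PySem.Int.mod n 2 = 0 then n + 1
         else n + ((PySem.Int.bxor n (n + 1) + 1) >>> (2:Nat))) := by
  rw [PySem.Int.band_one]
  by_cases h : PySem.Int.mod n 2 = 0
  · rw [if_pos h, if_pos h]
  · rw [if_neg h, if_neg h]
    obtain ⟨k, a, hk, hn⟩ := pvDecomp n.natAbs n le_rfl (by
      have h0 := PySem.Int.mod_nonneg n (show (0:Int) < 2 by norm_num)
      have hlt := PySem.Int.mod_lt n (show (0:Int) < 2 by norm_num)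
      omega) hne
    have hk31 := pvK_le k a n hk hn h1 h2
    subst hn
    rw [show a * 2^(k+1) + 2^k - 1 + 1 = a * 2^(k+1) + 2^k by ring,
        pvBxor_succ k a hk,
        show (2:Int)^(k+1) - 1 + 1 = 2^(k+1) by ring]
    have hsh : ((2:Int)^(k+1)) >>> (2:Nat) = 2^(k-1) := by
      rw [Int.shiftRight_eq_div_pow,
          show (2:Int)^(k+1) = 2^(k-1)*(2^2 : Nat) by
            have hkk : (2:Int)^(k+1) = 2^((k-1)+2) := by congr 1; omega
            rw [hkk, pow_add]; norm_num]
      exact Int.mul_ediv_cancel _ (by norm_num)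
    rw [hsh, pvLoop_eval k a hk 64 1 le_rfl hk (by omega)]

-- ===== VERDICT (by name: the statement is the Claim_ definition above) =====
theorem solution_spec : Claim_equal_solution := by
  intro numbers hdom hpre
  unfold Spec_solution solution solution_alt
  have hstep : (fun (answer : List Int) (number : Int) =>
      if PySem.Int.band number 1 = 0 then answer ++ [number + 1]
      else answer ++ [solLoopA number 1 64])
    = (fun (answer : List Int) (number : Int) => answer ++
        [if PySem.Int.band number 1 = 0 then number + 1 else solLoopA number 1 64]) := by
    funext answer number; split <;> rfl
  rw [hstep, PySem.List.foldl_append_singleton_eq_map]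
  apply List.map_congr_left
  intro n hn
  have hd : pvDomInt n = true := by
    have := (List.all_eq_true.mp hdom) n hn
    simpa using this
  have hd' : -2147483648 ≤ n ∧ n ≤ 2147483648 := by
    simpa [pvDomInt] using hd
  exact pvElem n hd'.1 hd'.2 (by rintro rfl; exact hpre hn)
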